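-- pv_equiv track=rewrite | github.com/Aasthaengg/IBMdataset | Python_codes/p02975/s610932487.py | divide_two
-- ===== SOURCE A (Python) =====
-- def divide_two(arg):
--   c = 0
--   while True:
--     if c >= 2:
--       break
--     if arg % 2 != 0:
--       break
--     arg //= 2
--     c += 1
--   return c
-- ===== SOURCE B (Python) =====
-- def divide_two(arg):
--   if arg % 2 != 0:
--     return 0
--   if arg % 4 != 0:
--     return 1
--   return 2
-- ===== Notes on version B (the rewrite author's own statement) =====
-- stated objective: simpler
-- what changed: Replaces the halving while-loop with a direct branch on the residues modulo two and modulo four (closed-form capped dyadic valuation).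
import Mathlib
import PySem

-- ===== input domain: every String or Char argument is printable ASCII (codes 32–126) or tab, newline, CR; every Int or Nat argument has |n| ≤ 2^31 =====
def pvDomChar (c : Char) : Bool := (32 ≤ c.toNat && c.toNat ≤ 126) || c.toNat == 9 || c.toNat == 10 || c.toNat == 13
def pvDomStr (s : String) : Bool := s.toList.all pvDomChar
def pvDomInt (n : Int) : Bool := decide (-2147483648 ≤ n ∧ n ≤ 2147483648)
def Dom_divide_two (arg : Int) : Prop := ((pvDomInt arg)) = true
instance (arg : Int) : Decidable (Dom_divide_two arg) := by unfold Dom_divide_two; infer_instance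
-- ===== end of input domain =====

-- B replaces A's halving while-loop with a direct branch on the residues modulo two and four (simpler, closed form).


-- ===== PORT A =====
-- loop state: (c, arg); breaks when c >= 2 or arg % 2 != 0; fuel = (2 - c).toNat
def divideTwoLoop (c arg : Int) : Int :=
  if c ≥ 2 then c
  else if PySem.Int.mod arg 2 ≠ 0 then c
  else divideTwoLoop (c + 1) (PySem.Int.floordiv arg 2)
termination_by (2 - c).toNat
decreasing_by omega

def divide_two (arg : Int) : Int := divideTwoLoop 0 arg

-- ===== PORT B =====
def divide_two_alt (arg : Int) : Int :=
  if PySem.Int.mod arg 2 ≠ 0 then 0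
  else if PySem.Int.mod arg 4 ≠ 0 then 1
  else 2

-- ===== PRECONDITION & SPEC =====
def Spec_divide_two (arg : Int) (out : Int) : Prop := out = divide_two_alt arg
instance (arg : Int) (out : Int) : Decidable (Spec_divide_two arg out) := by unfold Spec_divide_two; infer_instance

-- ===== CLAIM (what is proved, stated in full; the proofs are below) =====
def Claim_equal_divide_two : Prop := ∀ (arg : Int), Dom_divide_two arg → Spec_divide_two arg (divide_two arg)

-- ===== LEMMAS AND PROOFS =====

-- ===== VERDICT (by name: the statement is the Claim_ definition above) =====
theorem divide_two_spec : Claim_equal_divide_two := by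
  intro arg _
  unfold Spec_divide_two divide_two divide_two_alt
  rw [divideTwoLoop, divideTwoLoop, divideTwoLoop]
  simp only [PySem.Int.mod_eq_emod_of_pos (by omega : (0:Int) < 2),
    PySem.Int.mod_eq_emod_of_pos (by omega : (0:Int) < 4),
    PySem.Int.floordiv_eq_ediv_of_pos (by omega : (0:Int) < 2)]
  split_ifs <;> omega
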